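-- pv_equiv track=rewrite | github.com/thevivekpandey/data-science-bowl-2018 | remove_extraneous_masks.py | get_rle
-- ===== SOURCE A (Python) =====
-- def get_rle(arr):
--     current = arr[0]
--     start = arr[0]
--     count = 1
--     parts = []
--     for i in range(1, len(arr)):
--         if arr[i] == current + 1:
--             count += 1
--             current = arr[i]
--         else:
--             parts.append(str(start) + ' ' + str(count))
--             current = arr[i]
--             start = arr[i]
--             count = 1
--     parts.append(str(start) + ' ' + str(count))
--     return ' '.join(parts)
-- ===== SOURCE B (Python) =====
-- def get_rle(arr):
--     n = len(arr)
--     starts = [i for i in range(n) if i == 0 or arr[i] != arr[i - 1] + 1]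
--     ends = starts[1:] + [n]
--     return ' '.join(str(arr[s]) + ' ' + str(e - s) for s, e in zip(starts, ends))
-- ===== Notes on version B (the rewrite author's own statement) =====
-- stated objective: alternative
-- what changed: B is a staged-pass formulation: it first computes the list of run-boundary indices (where the value does not continue the previous value by +1), pairs each boundary with the next one by zipping the list with its own shift, and formats (value at start, end-start) pairs, instead of A's element-by-element state machine over (current,start,count,parts).
-- outside the precondition, e.g. on get_rle([]): A raises IndexError, B returns ''
import Mathlib
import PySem

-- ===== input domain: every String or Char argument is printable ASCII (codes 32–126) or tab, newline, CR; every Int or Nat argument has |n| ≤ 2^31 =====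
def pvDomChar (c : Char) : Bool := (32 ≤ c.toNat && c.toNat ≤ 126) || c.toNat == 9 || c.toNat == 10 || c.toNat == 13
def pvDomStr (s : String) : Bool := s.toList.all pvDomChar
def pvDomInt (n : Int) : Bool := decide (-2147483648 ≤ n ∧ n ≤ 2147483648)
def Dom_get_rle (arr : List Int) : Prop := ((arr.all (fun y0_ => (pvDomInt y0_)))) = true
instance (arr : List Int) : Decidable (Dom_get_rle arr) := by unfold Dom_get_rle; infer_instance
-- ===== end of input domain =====

-- B replaces A's stateful single-pass run-length loop by a staged boundary-index formulation
-- (compute break indices, zip with their shift, format pairs); alternative decomposition, same O(n) cost.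
-- Pre_ excludes the empty list, on which A raises IndexError (arr[0]) while B returns "".


-- ===== PORT A =====
-- one fold step of A's loop over state (current, start, count, parts)
def pvStepA (s : Int × Int × Int × List String) (x : Int) : Int × Int × Int × List String :=
  match s with
  | (current, start, count, parts) =>
    if x = current + 1 then (x, start, count + 1, parts)
    else (x, x, 1, parts ++ [PySem.Int.toStr start ++ " " ++ PySem.Int.toStr count])

def get_rle (arr : List Int) : String :=
  match arr with
  | [] => ""  -- Python raises IndexError here; excluded by Pre_get_rle
  | a :: rest =>
    let st := rest.foldl pvStepA (a, a, 1, [])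
    String.intercalate " " (st.2.2.2 ++ [PySem.Int.toStr st.2.1 ++ " " ++ PySem.Int.toStr st.2.2.1])

-- ===== PORT B =====
-- Python's `i == 0 or arr[i] != arr[i-1] + 1` short-circuits, so arr[i-1] is only read for i ≥ 1;
-- the Nat subtraction i-1 below is only reached (with i ≥ 1) in Python, so getD with default 0 is exact.
def pvBrk (arr : List Int) (i : Nat) : Bool :=
  i == 0 || !(arr.getD i 0 == arr.getD (i - 1) 0 + 1)

def get_rle_alt (arr : List Int) : String :=
  let n := arr.length
  let starts := (List.range n).filter (pvBrk arr)
  let ends := starts.drop 1 ++ [n]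
  String.intercalate " " ((starts.zip ends).map
    (fun p => PySem.Int.toStr (arr.getD p.1 0) ++ " " ++ PySem.Int.toStr ((p.2 - p.1 : Nat) : Int)))

-- ===== PRECONDITION & SPEC =====
-- Pre_ excludes exactly the empty list, on which Python A raises IndexError (arr[0]).
def Pre_get_rle (arr : List Int) : Prop := arr ≠ []
instance (arr : List Int) : Decidable (Pre_get_rle arr) := by unfold Pre_get_rle; infer_instance
def pvWitness_get_rle : List Int := ([1, 2, 3, 7, 9, 10])

def Spec_get_rle (arr : List Int) (out : String) : Prop := out = get_rle_alt arr
instance (arr : List Int) (out : String) : Decidable (Spec_get_rle arr out) := by unfold Spec_get_rle; infer_instance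

-- ===== CLAIM (what is proved, stated in full; the proofs are below) =====
def Claim_equal_get_rle : Prop := ∀ (arr : List Int), Dom_get_rle arr → Pre_get_rle arr → Spec_get_rle arr (get_rle arr)

-- ===== LEMMAS AND PROOFS =====

-- Normal form both sides are reduced to: the list of (start value, run length) pairs.
def pvRunLen (prev : Int) : List Int → Nat
  | [] => 0
  | x :: xs => if x = prev + 1 then 1 + pvRunLen x xs else 0

theorem pvRunLen_le (prev : Int) (xs : List Int) : pvRunLen prev xs ≤ xs.length := by
  induction xs generalizing prev with
  | nil => simp [pvRunLen]
  | cons x t ih =>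
    simp only [pvRunLen, List.length_cons]
    split
    · have := ih x; omega
    · omega

def pvRuns : List Int → List (Int × Nat)
  | [] => []
  | a :: rest =>
    let k := pvRunLen a rest
    (a, k + 1) :: pvRuns (rest.drop k)
termination_by xs => xs.length
decreasing_by
  simp only [List.length_drop, List.length_cons]
  have := pvRunLen_le a rest
  omega

def pvFmt (s k : Int) : String := PySem.Int.toStr s ++ " " ++ PySem.Int.toStr k

def pvRender (rs : List (Int × Nat)) : List String :=
  rs.map (fun sc => pvFmt sc.1 (sc.2 : Int))

theorem pvRuns_cons (a : Int) (rest : List Int) :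
    pvRuns (a :: rest) = (a, pvRunLen a rest + 1) :: pvRuns (rest.drop (pvRunLen a rest)) := by
  rw [pvRuns.eq_def]

-- ---- A side: the fold's invariant ----
theorem pvFoldA_eq (xs : List Int) : ∀ (c s k : Int) (p : List String),
    (let st := xs.foldl pvStepA (c, s, k, p)
     st.2.2.2 ++ [pvFmt st.2.1 st.2.2.1])
      = p ++ pvFmt s (k + (pvRunLen c xs : Nat))
          :: pvRender (pvRuns (xs.drop (pvRunLen c xs))) := by
  induction xs with
  | nil => intro c s k p; simp [pvRunLen, pvRuns, pvRender]
  | cons x t ih =>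
    intro c s k p
    by_cases h : x = c + 1
    · have hr : pvRunLen c (x :: t) = 1 + pvRunLen x t := by simp [pvRunLen, if_pos h]
      have hd : List.drop (1 + pvRunLen x t) (x :: t) = List.drop (pvRunLen x t) t := by
        rw [Nat.add_comm]; exact List.drop_succ_cons
      rw [hr, hd]
      simp only [List.foldl_cons, pvStepA, if_pos h]
      rw [ih x s (k + 1) p]
      congr 2
      unfold pvFmt
      congr 2
      push_cast
      ring_nf
    · have hr : pvRunLen c (x :: t) = 0 := by simp [pvRunLen, if_neg h]
      rw [hr]
      simp only [List.foldl_cons, pvStepA, if_neg h]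
      rw [ih x x 1 (p ++ [PySem.Int.toStr s ++ " " ++ PySem.Int.toStr k])]
      rw [Nat.cast_zero, List.drop_zero, pvRuns_cons]
      simp only [pvRender, List.map_cons, List.append_assoc,
        List.cons_append, List.nil_append]
      congr 2
      · simp [pvFmt]
      · unfold pvFmt
        congr 2
        push_cast
        ring_nf

theorem getA_eq (a : Int) (rest : List Int) :
    get_rle (a :: rest) = String.intercalate " " (pvRender (pvRuns (a :: rest))) := by
  unfold get_rle
  simp only
  have hA : (let st := rest.foldl pvStepA (a, a, 1, [])
      st.2.2.2 ++ [PySem.Int.toStr st.2.1 ++ " " ++ PySem.Int.toStr st.2.2.1])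
      = (let st := rest.foldl pvStepA (a, a, 1, [])
      st.2.2.2 ++ [pvFmt st.2.1 st.2.2.1]) := rfl
  rw [hA, pvFoldA_eq rest a a 1 [], pvRuns_cons]
  simp only [pvRender, List.nil_append, List.map_cons]
  congr 3
  push_cast
  ring

-- ---- B side ----
def pvStartsD (arr : List Int) : List Nat := (List.range arr.length).filter (pvBrk arr)

-- break predicate shifted past the head: pvG p l at index i is the break test at position i+1 of p::l
def pvG (p : Int) (l : List Int) : List Nat :=
  (List.range l.length).filter (fun i => !(l.getD i 0 == (p :: l).getD i 0 + 1))

theorem succ_eq_add_one_fun : (Nat.succ : Nat → Nat) = (· + 1) := funext fun _ => rfl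

theorem starts_cons (p : Int) (l : List Int) :
    pvStartsD (p :: l) = 0 :: (pvG p l).map (· + 1) := by
  unfold pvStartsD pvG
  rw [List.length_cons, List.range_succ_eq_map, List.filter_cons,
    if_pos (by simp [pvBrk] : pvBrk (p :: l) 0 = true), List.filter_map]
  have hpred : (pvBrk (p :: l) ∘ Nat.succ)
      = (fun i => !(l.getD i 0 == (p :: l).getD i 0 + 1)) := by
    funext i
    simp [pvBrk, Function.comp]
  rw [hpred, succ_eq_add_one_fun]

theorem pvG_eq (a : Int) (rest : List Int) :
    pvG a rest = (pvStartsD (rest.drop (pvRunLen a rest))).map (· + pvRunLen a rest) := by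
  induction rest generalizing a with
  | nil => simp [pvG, pvStartsD]
  | cons x t ih =>
    have hpred : ((fun i => !((x :: t).getD i 0 == (a :: x :: t).getD i 0 + 1)) ∘ Nat.succ)
        = (fun i => !(t.getD i 0 == (x :: t).getD i 0 + 1)) := by
      funext i
      simp [Function.comp]
    by_cases h : x = a + 1
    · have hr : pvRunLen a (x :: t) = 1 + pvRunLen x t := by simp [pvRunLen, if_pos h]
      have hstep : pvG a (x :: t) = (pvG x t).map (· + 1) := by
        unfold pvG
        rw [List.length_cons, List.range_succ_eq_map, List.filter_cons,
          if_neg (by simp [h] :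
            ¬ ((fun i => !((x :: t).getD i 0 == (a :: x :: t).getD i 0 + 1)) 0 = true)),
          List.filter_map, hpred, succ_eq_add_one_fun]
      rw [hstep, ih x, hr]
      have hd : List.drop (1 + pvRunLen x t) (x :: t) = List.drop (pvRunLen x t) t := by
        rw [Nat.add_comm]; exact List.drop_succ_cons
      rw [hd, List.map_map]
      congr 1
      funext i
      simp [Function.comp]
      omega
    · have hr : pvRunLen a (x :: t) = 0 := by simp [pvRunLen, if_neg h]
      rw [hr, List.drop_zero]
      have hstep : pvG a (x :: t) = 0 :: (pvG x t).map (· + 1) := by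
        unfold pvG
        rw [List.length_cons, List.range_succ_eq_map, List.filter_cons,
          if_pos (by simp [h] :
            ((fun i => !((x :: t).getD i 0 == (a :: x :: t).getD i 0 + 1)) 0 = true)),
          List.filter_map, hpred, succ_eq_add_one_fun]
      rw [hstep, starts_cons]
      simp

theorem starts_split (a : Int) (rest : List Int) :
    pvStartsD (a :: rest)
      = 0 :: (pvStartsD (rest.drop (pvRunLen a rest))).map (· + (pvRunLen a rest + 1)) := by
  rw [starts_cons, pvG_eq, List.map_map]
  rfl

theorem getD_drop (l : List Int) (i j : Nat) :
    (l.drop i).getD j 0 = l.getD (i + j) 0 := by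
  simp [List.getD, List.getElem?_drop]

def pvFmtB (arr : List Int) (p : Nat × Nat) : String :=
  PySem.Int.toStr (arr.getD p.1 0) ++ " " ++ PySem.Int.toStr ((p.2 - p.1 : Nat) : Int)

def pvPartsB (arr : List Int) : List String :=
  ((pvStartsD arr).zip ((pvStartsD arr).drop 1 ++ [arr.length])).map (pvFmtB arr)

theorem partsB_eq : ∀ (n : Nat) (arr : List Int), arr.length ≤ n →
    pvPartsB arr = pvRender (pvRuns arr) := by
  intro n
  induction n with
  | zero =>
    intro arr h
    have : arr = [] := by
      cases arr with
      | nil => rfl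
      | cons a l => simp at h
    subst this
    simp [pvPartsB, pvStartsD, pvRuns, pvRender]
  | succ n ih =>
    intro arr h
    match arr with
    | [] => simp [pvPartsB, pvStartsD, pvRuns, pvRender]
    | a :: rest =>
      rw [pvRuns_cons]
      have hkle : pvRunLen a rest ≤ rest.length := pvRunLen_le a rest
      have hrec : pvPartsB (rest.drop (pvRunLen a rest))
          = pvRender (pvRuns (rest.drop (pvRunLen a rest))) := by
        apply ih
        simp only [List.length_drop]
        simp only [List.length_cons] at h
        omega
      have hsplit := starts_split a rest
      cases hre : rest.drop (pvRunLen a rest) with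
      | nil =>
        rw [hre] at hsplit hrec
        have hlen := congrArg List.length hre
        simp only [List.length_drop, List.length_nil] at hlen
        unfold pvPartsB
        rw [hsplit]
        simp only [pvStartsD, List.length_nil, List.range_zero, List.filter_nil,
          List.map_nil, List.drop_succ_cons, List.drop_nil, List.nil_append,
          List.length_cons, List.zip_cons_cons, List.zip_nil_left, List.map_cons, List.map_nil]
        rw [pvRuns.eq_def]
        simp only [pvRender, List.map_cons, List.map_nil]
        unfold pvFmtB pvFmt
        simp only [List.getD_cons_zero]
        have h10 : rest.length + 1 - 0 = pvRunLen a rest + 1 := by omega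
        rw [h10]
      | cons r0 rt =>
        rw [hre] at hsplit hrec
        have hlen := congrArg List.length hre
        simp only [List.length_drop, List.length_cons] at hlen
        have hs' : pvStartsD (r0 :: rt) = 0 :: (pvG r0 rt).map (· + 1) := starts_cons r0 rt
        unfold pvPartsB
        rw [hsplit, hs']
        simp only [List.map_cons, List.drop_succ_cons, List.drop_zero, List.length_cons,
          List.cons_append]
        have hn : rest.length + 1 = (rt.length + 1) + (pvRunLen a rest + 1) := by omega
        rw [hn, List.zip_cons_cons]
        have h1 : (0 + (pvRunLen a rest + 1))
              :: ((pvG r0 rt).map (· + 1)).map (· + (pvRunLen a rest + 1))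
            = ((0 :: (pvG r0 rt).map (· + 1)).map (· + (pvRunLen a rest + 1))) := by
          rw [List.map_cons]
        have hmapapp : ((pvG r0 rt).map (· + 1)).map (· + (pvRunLen a rest + 1))
              ++ [(rt.length + 1) + (pvRunLen a rest + 1)]
            = (((pvG r0 rt).map (· + 1)) ++ [rt.length + 1]).map (· + (pvRunLen a rest + 1)) := by
          rw [List.map_append]
          rfl
        rw [h1, hmapapp, List.zip_map, List.map_cons, List.map_map]
        have hfm : ∀ p : Nat × Nat,
            (pvFmtB (a :: rest) ∘ Prod.map (· + (pvRunLen a rest + 1)) (· + (pvRunLen a rest + 1))) p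
              = pvFmtB (r0 :: rt) p := by
          intro p
          simp only [Function.comp, Prod.map, pvFmtB]
          have hget : (a :: rest).getD (p.1 + (pvRunLen a rest + 1)) 0 = (r0 :: rt).getD p.1 0 := by
            rw [← hre]
            have hdc : (a :: rest).drop (pvRunLen a rest + 1) = rest.drop (pvRunLen a rest) :=
              List.drop_succ_cons
            rw [← hdc, getD_drop]
            congr 1
            omega
          rw [hget]
          congr 2
          omega
        rw [List.map_congr_left (fun p _ => hfm p)]
        have hparts' : pvPartsB (r0 :: rt)
            = ((0 :: (pvG r0 rt).map (· + 1)).zip (((pvG r0 rt).map (· + 1)) ++ [rt.length + 1])).map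
                (pvFmtB (r0 :: rt)) := by
          unfold pvPartsB
          rw [hs']
          simp
        rw [← hparts', hrec]
        unfold pvRender
        rw [List.map_cons]
        congr 1
        unfold pvFmtB pvFmt
        simp only [List.getD_cons_zero]
        have h20 : 0 + (pvRunLen a rest + 1) - 0 = pvRunLen a rest + 1 := by omega
        rw [h20]

theorem getB_eq (arr : List Int) :
    get_rle_alt arr = String.intercalate " " (pvPartsB arr) := by
  unfold get_rle_alt pvPartsB pvStartsD pvFmtB
  rfl

-- ===== VERDICT (by name: the statement is the Claim_ definition above) =====
theorem get_rle_spec : Claim_equal_get_rle := by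
  intro arr _ hpre
  unfold Spec_get_rle
  match arr with
  | [] => exact absurd rfl hpre
  | a :: rest =>
    rw [getA_eq, getB_eq, partsB_eq (a :: rest).length _ le_rfl]
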